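-- pv_equiv track=rewrite | github.com/kybaq/code-study | Week_2_연결리스트/김성준/1406/에디터.py | editor
-- ===== SOURCE A (Python) =====
-- from collections import deque
--
-- def editor(initial_string, commands):
--
--     # 왼쪽과 오른쪽을 deque로 초기화
--     left = deque(initial_string)
--     right = deque()
--
--     for command in commands:
--         if command[0] == 'L':  # 커서를 왼쪽으로 이동
--             if left:
--                 right.appendleft(left.pop())
--         elif command[0] == 'D':  # 커서를 오른쪽으로 이동
--             if right:
--                 left.append(right.popleft())
--         elif command[0] == 'B':  # 왼쪽 문자 삭제
--             if left:
--                 left.pop()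
--         elif command[0] == 'P':  # 왼쪽에 문자 삽입
--             left.append(command[1])
--
--     # 최종 문자열 생성
--     return ''.join(left) + ''.join(right)
-- ===== SOURCE B (Python) =====
-- def editor(initial_string, commands):
--     # one buffer + integer cursor: L/D move only the index, B/P edit in place
--     buf = list(initial_string)
--     pos = len(buf)
--     for command in commands:
--         c = command[0]
--         if c == 'L':
--             if pos > 0:
--                 pos -= 1
--         elif c == 'D':
--             if pos < len(buf):
--                 pos += 1
--         elif c == 'B':
--             if pos > 0:
--                 del buf[pos - 1]
--                 pos -= 1
--         elif c == 'P':
--             buf.insert(pos, command[1])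
--             pos += 1
--     return ''.join(buf)
-- ===== Notes on version B (the rewrite author's own statement) =====
-- stated objective: idiomatic
-- what changed: Replaces the two-deque split representation (characters physically moved between left/right on every cursor move) by a single list buffer with an integer cursor index, so L/D only change the index and B/P edit the buffer in place.
import Mathlib
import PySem

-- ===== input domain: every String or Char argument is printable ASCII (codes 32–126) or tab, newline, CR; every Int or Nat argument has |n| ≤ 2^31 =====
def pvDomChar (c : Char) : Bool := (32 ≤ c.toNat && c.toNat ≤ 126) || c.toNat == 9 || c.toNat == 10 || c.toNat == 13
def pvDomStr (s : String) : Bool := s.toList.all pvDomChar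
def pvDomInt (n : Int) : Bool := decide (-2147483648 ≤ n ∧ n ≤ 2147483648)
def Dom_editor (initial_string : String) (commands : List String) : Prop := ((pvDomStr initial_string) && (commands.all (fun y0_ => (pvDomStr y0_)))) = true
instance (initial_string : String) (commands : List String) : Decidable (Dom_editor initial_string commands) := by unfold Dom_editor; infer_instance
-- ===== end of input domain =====

-- B replaces A's two deques by a single buffer list plus an integer cursor index (return value only).
-- ===== PORT A =====
-- one command step of A: state = (left, right) deques of characters
def editorStepA (st : List Char × List Char) (command : String) : List Char × List Char :=
  match command.toList with
  | [] => st  -- Python: command[0] raises IndexError; excluded by Pre_editor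
  | c0 :: rest =>
    if c0 = 'L' then
      if st.1 = [] then st else (st.1.dropLast, st.1.getLastD ' ' :: st.2)
    else if c0 = 'D' then
      match st.2 with
      | [] => st
      | r0 :: rs => (st.1 ++ [r0], rs)
    else if c0 = 'B' then
      if st.1 = [] then st else (st.1.dropLast, st.2)
    else if c0 = 'P' then
      (st.1 ++ [rest.headD ' '], st.2)  -- rest = [] : Python raises IndexError; excluded by Pre_editor
    else st

def editor (initial_string : String) (commands : List String) : String :=
  let st := commands.foldl editorStepA (initial_string.toList, [])
  String.mk (st.1 ++ st.2)

-- ===== PORT B =====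
-- one command step of B: state = (buffer, cursor position)
def editorStepB (st : List Char × Nat) (command : String) : List Char × Nat :=
  match command.toList with
  | [] => st  -- Python: command[0] raises IndexError; excluded by Pre_editor
  | c0 :: rest =>
    if c0 = 'L' then
      if 0 < st.2 then (st.1, st.2 - 1) else st
    else if c0 = 'D' then
      if st.2 < st.1.length then (st.1, st.2 + 1) else st
    else if c0 = 'B' then
      if 0 < st.2 then (st.1.take (st.2 - 1) ++ st.1.drop st.2, st.2 - 1) else st
    else if c0 = 'P' then
      (st.1.take st.2 ++ [rest.headD ' '] ++ st.1.drop st.2, st.2 + 1)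
    else st

def editor_alt (initial_string : String) (commands : List String) : String :=
  let st := commands.foldl editorStepB (initial_string.toList, initial_string.toList.length)
  String.mk st.1

-- ===== PRECONDITION & SPEC =====
-- Pre_ excludes exactly the inputs on which A raises IndexError: an empty command string
-- (command[0]) or a one-character 'P' command (command[1]); B raises there too.
def Pre_editor (initial_string : String) (commands : List String) : Prop :=
  ∀ c ∈ commands, c.toList ≠ [] ∧ (c.toList.headD ' ' = 'P' → 2 ≤ c.toList.length)
instance (initial_string : String) (commands : List String) : Decidable (Pre_editor initial_string commands) := by unfold Pre_editor; infer_instance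
def pvWitness_editor : String × List String := ("ab", ["L", "Px", "B", "D", "L"])

def Spec_editor (initial_string : String) (commands : List String) (out : String) : Prop := out = editor_alt initial_string commands
instance (initial_string : String) (commands : List String) (out : String) : Decidable (Spec_editor initial_string commands out) := by unfold Spec_editor; infer_instance

-- ===== CLAIM (what is proved, stated in full; the proofs are below) =====
def Claim_equal_editor : Prop := ∀ (initial_string : String) (commands : List String), Dom_editor initial_string commands → Pre_editor initial_string commands → Spec_editor initial_string commands (editor initial_string commands)

-- ===== LEMMAS AND PROOFS =====

theorem editor_dropLast_getLastD {l : List Char} (r : List Char) (h : l ≠ []) :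
    l.dropLast ++ (l.getLast?.getD ' ') :: r = l ++ r := by
  induction l with
  | nil => exact absurd rfl h
  | cons a t ih =>
    cases t with
    | nil => simp
    | cons b u => simpa using ih (by simp)

theorem editor_step_equiv (command : String) (l r : List Char)
    (hne : command.toList ≠ [])
    (hP : command.toList.headD ' ' = 'P' → 2 ≤ command.toList.length) :
    editorStepB (l ++ r, l.length) command =
      ((editorStepA (l, r) command).1 ++ (editorStepA (l, r) command).2,
       (editorStepA (l, r) command).1.length) := by
  unfold editorStepA editorStepB
  cases hc : command.toList with
  | nil => exact absurd hc hne
  | cons c0 rest =>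
    by_cases hL : c0 = 'L'
    · simp only [hL, if_pos rfl]
      cases l with
      | nil => simp
      | cons a t =>
        have hlen : (0:Nat) < (a :: t).length := by simp
        simp only [if_pos hlen, if_neg (by simp : ¬ (a :: t) = ([] : List Char))]
        refine Prod.ext ?_ ?_
        · simp [editor_dropLast_getLastD r (by simp : (a :: t) ≠ [])]
        · simp [List.length_dropLast]
    by_cases hD : c0 = 'D'
    · simp only [hD, if_neg hL, if_pos rfl]
      cases r with
      | nil => simp
      | cons r0 rs =>
        have hlt : l.length < (l ++ r0 :: rs).length := by simp
        simp only [if_pos hlt]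
        refine Prod.ext ?_ ?_
        · simp
        · simp
    by_cases hB : c0 = 'B'
    · simp only [if_neg hL, if_neg hD, if_pos hB]
      cases l with
      | nil => simp
      | cons a t =>
        have hlen : (0:Nat) < (a :: t).length := by simp
        have h1 : List.take ((a :: t).length - 1) ((a :: t) ++ r) = (a :: t).dropLast := by
          rw [List.dropLast_eq_take, List.take_append_of_le_length (by omega)]
        have h2 : List.drop (a :: t).length ((a :: t) ++ r) = r := List.drop_left
        simp only [if_pos hlen, if_neg (by simp : ¬ (a :: t) = ([] : List Char)), h1, h2]
        refine Prod.ext ?_ ?_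
        · rfl
        · simp [List.length_dropLast]
    by_cases hPc : c0 = 'P'
    · simp only [if_neg hL, if_neg hD, if_neg hB, if_pos hPc]
      have h1 : List.take l.length (l ++ r) = l := List.take_left
      have h2 : List.drop l.length (l ++ r) = r := List.drop_left
      simp only [h1, h2]
      refine Prod.ext ?_ ?_
      · simp
      · simp
    · simp [if_neg hL, if_neg hD, if_neg hB, if_neg hPc]

theorem editor_fold_equiv (commands : List String) (l r : List Char)
    (hpre : ∀ c ∈ commands, c.toList ≠ [] ∧ (c.toList.headD ' ' = 'P' → 2 ≤ c.toList.length)) :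
    commands.foldl editorStepB (l ++ r, l.length) =
      ((commands.foldl editorStepA (l, r)).1 ++ (commands.foldl editorStepA (l, r)).2,
       (commands.foldl editorStepA (l, r)).1.length) := by
  induction commands generalizing l r with
  | nil => simp
  | cons c cs ih =>
    obtain ⟨h1, h2⟩ := hpre c (by simp)
    simp only [List.foldl_cons, editor_step_equiv c l r h1 h2]
    exact ih _ _ (fun d hd => hpre d (by simp [hd]))

-- ===== VERDICT (by name: the statement is the Claim_ definition above) =====
theorem editor_spec : Claim_equal_editor := by
  intro s commands _ hpre
  unfold Spec_editor editor editor_alt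
  have h := editor_fold_equiv commands s.toList [] hpre
  rw [List.append_nil] at h
  rw [h]
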